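-- pv_equiv track=rewrite | github.com/moradi2558/Backend_task_test | reverse string.py | reverse_without_punctuation_using_stack
-- ===== SOURCE A (Python) =====
-- import string
--
-- def reverse_without_punctuation_using_stack(s):
--
--     punctuation = string.punctuation
--
--
--     stack = []
--
--
--     for char in s:
--         if char not in punctuation:
--             stack.append(char)
--
--     result = []
--
--
--     for char in s:
--         if char in punctuation:
--             result.append(char)
--         else:
--             result.append(stack.pop())
--
--     return ''.join(result)
-- ===== SOURCE B (Python) =====
-- import string
--
-- def reverse_without_punctuation_using_stack(s):
--     punctuation = string.punctuation
--     chars = list(s)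
--     i, j = 0, len(chars) - 1
--     while i < j:
--         if chars[i] in punctuation:
--             i += 1
--         elif chars[j] in punctuation:
--             j -= 1
--         else:
--             chars[i], chars[j] = chars[j], chars[i]
--             i += 1
--             j -= 1
--     return ''.join(chars)
-- ===== Notes on version B (the rewrite author's own statement) =====
-- stated objective: alternative
-- what changed: Replaces the push-all-then-pop-per-char stack with two converging pointers that skip punctuation and swap non-punctuation characters in place.
import Mathlib
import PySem

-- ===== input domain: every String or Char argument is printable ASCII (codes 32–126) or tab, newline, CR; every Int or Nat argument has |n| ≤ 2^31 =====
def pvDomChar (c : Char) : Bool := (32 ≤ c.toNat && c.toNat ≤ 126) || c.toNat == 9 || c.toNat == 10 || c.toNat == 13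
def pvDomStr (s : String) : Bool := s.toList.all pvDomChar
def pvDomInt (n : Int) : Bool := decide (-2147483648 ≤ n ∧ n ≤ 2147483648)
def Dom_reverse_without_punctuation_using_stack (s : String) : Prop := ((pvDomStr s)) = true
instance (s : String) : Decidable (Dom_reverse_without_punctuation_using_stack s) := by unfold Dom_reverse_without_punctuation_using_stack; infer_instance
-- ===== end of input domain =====

-- B replaces A's push-all-then-pop stack with two converging pointers that swap
-- non-punctuation characters in place (alternative decomposition, same cost).

-- string.punctuation
def pvPunct : List Char := "!\"#$%&'()*+,-./:;<=>?@[\\]^_`{|}~".toList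

-- ===== PORT A =====
-- first loop: for char in s: if char not in punctuation: stack.append(char)
def pvStackLoop (s : List Char) : List Char :=
  s.foldl (fun st c => if pvPunct.contains c then st else st ++ [c]) []

-- second loop: for char in s: punctuation chars pass through, others take stack.pop()
-- (stack.pop() on an empty stack would raise IndexError in Python; that case is
-- unreachable here since the stack holds one entry per non-punctuation char, so the
-- getD default is never used)
def pvResultLoop : List Char → List Char → List Char
  | [], _stack => []
  | c :: rest, stack =>
    if pvPunct.contains c then c :: pvResultLoop rest stack
    else (stack.getLast?.getD c) :: pvResultLoop rest stack.dropLast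

def reverse_without_punctuation_using_stack (s : String) : String :=
  String.mk (pvResultLoop s.toList (pvStackLoop s.toList))

-- ===== PORT B =====
-- while i < j: skip punctuation on either side, otherwise swap chars[i], chars[j]
-- (the getD defaults are never used: i < j < chars.length throughout the loop)
def pvSwapLoop (l : List Char) (i j : Nat) : List Char :=
  if _h : i < j then
    if pvPunct.contains (l.getD i ' ') then pvSwapLoop l (i + 1) j
    else if pvPunct.contains (l.getD j ' ') then pvSwapLoop l i (j - 1)
    else pvSwapLoop ((l.set i (l.getD j ' ')).set j (l.getD i ' ')) (i + 1) (j - 1)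
  else l
termination_by j - i
decreasing_by all_goals omega

def reverse_without_punctuation_using_stack_alt (s : String) : String :=
  String.mk (pvSwapLoop s.toList 0 (s.toList.length - 1))

-- ===== PRECONDITION & SPEC =====
def Spec_reverse_without_punctuation_using_stack (s : String) (out : String) : Prop := out = reverse_without_punctuation_using_stack_alt s
instance (s : String) (out : String) : Decidable (Spec_reverse_without_punctuation_using_stack s out) := by unfold Spec_reverse_without_punctuation_using_stack; infer_instance

-- ===== CLAIM (what is proved, stated in full; the proofs are below) =====
def Claim_equal_reverse_without_punctuation_using_stack : Prop := ∀ (s : String), Dom_reverse_without_punctuation_using_stack s → Spec_reverse_without_punctuation_using_stack s (reverse_without_punctuation_using_stack s)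

-- ===== LEMMAS AND PROOFS =====

-- proof-side spec: put the chars of r into the non-punctuation slots of xs, in order
def pvFill : List Char → List Char → List Char
  | [], _ => []
  | c :: cs, r =>
    if pvPunct.contains c then c :: pvFill cs r
    else
      match r with
      | [] => c :: pvFill cs []
      | d :: ds => d :: pvFill cs ds

-- proof-side spec of the two-pointer loop on a whole list
def pvG : List Char → List Char
  | [] => []
  | [c] => [c]
  | c :: d :: rest =>
    let e := (d :: rest).getLast (by simp)
    let mid := (d :: rest).dropLast
    if pvPunct.contains c then c :: pvG (d :: rest)
    else if pvPunct.contains e then pvG (c :: mid) ++ [e]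
    else e :: pvG mid ++ [c]
termination_by l => l.length
decreasing_by all_goals simp_all [List.length_dropLast] <;> omega

theorem pvStackLoop_eq (l : List Char) :
    pvStackLoop l = l.filter (fun c => !pvPunct.contains c) := by
  suffices h : ∀ acc, l.foldl (fun st c => if pvPunct.contains c then st else st ++ [c]) acc
      = acc ++ l.filter (fun c => !pvPunct.contains c) by
    simpa [pvStackLoop] using h []
  induction l with
  | nil => simp
  | cons c cs ih =>
    intro acc
    rw [List.foldl_cons, ih]
    by_cases hc : c ∈ pvPunct
    · simp [List.filter_cons, hc]
    · simp [List.filter_cons, hc]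

theorem pvResultLoop_eq (l : List Char) : ∀ st, pvResultLoop l st = pvFill l st.reverse := by
  induction l with
  | nil => intro st; simp [pvResultLoop, pvFill]
  | cons c cs ih =>
    intro st
    by_cases hc : c ∈ pvPunct
    · simp [pvResultLoop, pvFill, hc, ih]
    · rcases st.eq_nil_or_concat with rfl | ⟨ys, d, rfl⟩
      · simp [pvResultLoop, pvFill, hc, ih]
      · simp [pvResultLoop, pvFill, hc, ih, List.getLast?_concat, List.dropLast_concat]

theorem pvFill_append (xs ys r : List Char) :
    pvFill (xs ++ ys) r
      = pvFill xs r ++ pvFill ys (r.drop (xs.filter (fun c => !pvPunct.contains c)).length) := by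
  induction xs generalizing r with
  | nil => simp [pvFill]
  | cons c cs ih =>
    by_cases hc : c ∈ pvPunct
    · simp [pvFill, hc, ih, List.filter_cons]
    · cases r with
      | nil => simp [pvFill, hc, ih, List.filter_cons]
      | cons d ds => simp [pvFill, hc, ih, List.filter_cons]

theorem pvFill_extend (xs r t : List Char)
    (h : (xs.filter (fun c => !pvPunct.contains c)).length = r.length) :
    pvFill xs (r ++ t) = pvFill xs r := by
  induction xs generalizing r with
  | nil => simp [pvFill]
  | cons c cs ih =>
    by_cases hc : c ∈ pvPunct
    · simp [List.filter_cons, hc] at h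
      simp [pvFill, hc, ih _ (by simpa using h)]
    · cases r with
      | nil => simp [List.filter_cons, hc] at h
      | cons d ds =>
        simp [List.filter_cons, hc] at h
        simp [pvFill, hc, ih _ (by simpa using h)]

theorem pvFill_cons_neg {c : Char} (hc : c ∉ pvPunct) (cs : List Char) (d : Char)
    (ds : List Char) : pvFill (c :: cs) (d :: ds) = d :: pvFill cs ds := by
  simp [pvFill, hc]

theorem pvG_eq : ∀ (n : Nat) (l : List Char), l.length ≤ n →
    pvG l = pvFill l ((l.filter (fun c => !pvPunct.contains c)).reverse) := by
  intro n
  induction n with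
  | zero =>
    intro l hl
    cases l with
    | nil => simp [pvG, pvFill]
    | cons a l => simp at hl
  | succ n ih =>
    intro l hl
    match l with
    | [] => simp [pvG, pvFill]
    | [c] => by_cases hc : c ∈ pvPunct <;> simp [pvG, pvFill, List.filter_cons, hc]
    | c :: d :: rest =>
      rcases (d :: rest).eq_nil_or_concat with h2 | ⟨mid, e, h2⟩
      · simp at h2
      have hlen : (d :: rest).length = mid.length + 1 := by rw [h2]; simp
      have hG : pvG (c :: d :: rest)
          = (if c ∈ pvPunct then c :: pvG (d :: rest)
             else if e ∈ pvPunct then pvG (c :: mid) ++ [e]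
             else e :: pvG mid ++ [c]) := by
        rw [pvG]
        simp only [List.contains_eq_mem, decide_eq_true_eq]
        congr 1 <;> rw [show ((d :: rest).getLast (by simp)) = e from by
          simp [h2, List.getLast_concat]]
        congr 1 <;> rw [show (d :: rest).dropLast = mid from by simp [h2]]
      by_cases hc : c ∈ pvPunct
      · rw [hG, if_pos hc, ih (d :: rest) (by simp at hl ⊢; omega)]
        simp [pvFill, List.filter_cons, hc]
      · by_cases he : e ∈ pvPunct
        · rw [hG, if_neg hc, if_pos he,
            ih (c :: mid) (by simp at hl hlen ⊢; omega)]
          rw [show (c :: d :: rest) = (c :: mid) ++ [e] from by simp [h2]]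
          rw [pvFill_append]
          have hf : ((c :: mid) ++ [e]).filter (fun c => !pvPunct.contains c)
              = (c :: mid).filter (fun c => !pvPunct.contains c) := by
            simp [List.filter_append, List.filter_cons, he]
          rw [hf]
          simp [pvFill, he]
        · rw [hG, if_neg hc, if_neg he, ih mid (by simp at hl hlen ⊢; omega)]
          rw [show (c :: d :: rest) = c :: (mid ++ [e]) from by simp [h2]]
          rw [show ((c :: (mid ++ [e])).filter (fun x => !pvPunct.contains x))
              = c :: ((mid.filter (fun x => !pvPunct.contains x)) ++ [e]) from by
            simp [List.filter_cons, List.filter_append, hc, he]]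
          rw [show ((c :: ((mid.filter (fun x => !pvPunct.contains x)) ++ [e])).reverse)
              = e :: ((mid.filter (fun x => !pvPunct.contains x)).reverse ++ [c]) from by
            simp]
          rw [pvFill_cons_neg hc]
          rw [pvFill_append mid [e] ((mid.filter (fun x => !pvPunct.contains x)).reverse ++ [c])]
          rw [show (((mid.filter (fun x => !pvPunct.contains x)).reverse ++ [c]).drop
              (mid.filter (fun c => !pvPunct.contains c)).length) = [c] from
            List.drop_left' (by simp)]
          rw [pvFill_extend mid ((mid.filter (fun x => !pvPunct.contains x)).reverse) [c]
              (by simp)]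
          rw [pvFill_cons_neg he]
          simp [pvFill]

theorem pvG_cons_concat (c : Char) (mid : List Char) (e : Char) :
    pvG (c :: (mid ++ [e]))
      = if c ∈ pvPunct then c :: pvG (mid ++ [e])
        else if e ∈ pvPunct then pvG (c :: mid) ++ [e]
        else e :: pvG mid ++ [c] := by
  cases hx : mid ++ [e] with
  | nil => simp at hx
  | cons d rest =>
    have h2 : d :: rest = mid.concat e := by rw [← hx]; simp
    rw [pvG]
    simp only [List.contains_eq_mem, decide_eq_true_eq]
    rw [show ((d :: rest).getLast (by simp)) = e from by simp [h2, List.getLast_concat]]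
    rw [show (d :: rest).dropLast = mid from by simp [h2]]

theorem pvSwapLoop_base (l : List Char) (i j : Nat) (hij : ¬ i < j) (hj : j < l.length)
    (hle : i ≤ j + 1) :
    l = l.take i ++ pvG ((l.drop i).take (j + 1 - i)) ++ l.drop (j + 1) := by
  have hd : l.drop j = l[j] :: l.drop (j + 1) := List.drop_eq_getElem_cons hj
  rcases (by omega : i = j ∨ i = j + 1) with rfl | rfl
  · rw [show (l.drop i).take (i + 1 - i) = [l[i]] from by
      rw [show i + 1 - i = 1 from by omega]; rw [hd]; rw [List.take_succ_cons, List.take_zero]]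
    rw [show pvG [l[i]] = [l[i]] from by rw [pvG]]
    conv_lhs => rw [← List.take_append_drop i l, hd]
    simp
  · rw [show j + 1 - (j + 1) = 0 from by omega]
    rw [show ((l.drop (j + 1)).take 0) = [] from by simp]
    rw [show pvG [] = [] from by rw [pvG]]
    simp

theorem pvSwapLoop_eq : ∀ (n : Nat) (l : List Char) (i j : Nat), j - i ≤ n →
    j < l.length → i ≤ j + 1 →
    pvSwapLoop l i j = l.take i ++ pvG ((l.drop i).take (j + 1 - i)) ++ l.drop (j + 1) := by
  intro n
  induction n with
  | zero =>
    intro l i j hn hj hle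
    rw [pvSwapLoop, dif_neg (by omega)]
    exact pvSwapLoop_base l i j (by omega) hj hle
  | succ n ih =>
    intro l i j hn hj hle
    by_cases hij : i < j
    · have hi : i < l.length := lt_trans hij hj
      have hgi : l.getD i ' ' = l[i] := List.getD_eq_getElem l ' ' hi
      have hgj : l.getD j ' ' = l[j] := List.getD_eq_getElem l ' ' hj
      have hdi : l.drop i = l[i] :: l.drop (i + 1) := List.drop_eq_getElem_cons hi
      have hdj : l.drop j = l[j] :: l.drop (j + 1) := List.drop_eq_getElem_cons hj
      have hmidlen : ((l.drop (i + 1)).take (j - (i + 1))).length = j - (i + 1) := by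
        simp; omega
      have hdi1 : l.drop (i + 1) = (l.drop (i + 1)).take (j - (i + 1)) ++ l.drop j := by
        conv_lhs => rw [← List.take_append_drop (j - (i + 1)) (l.drop (i + 1))]
        congr 1
        rw [List.drop_drop]
        congr 1
        omega
      have hseg2 : (l.drop (i + 1)).take (j - i)
          = (l.drop (i + 1)).take (j - (i + 1)) ++ [l[j]] := by
        conv_lhs => rw [hdi1, hdj]
        rw [List.take_append, List.take_of_length_le (by omega)]
        rw [show j - i - ((l.drop (i + 1)).take (j - (i + 1))).length = 1 from by omega]
        rw [List.take_succ_cons, List.take_zero]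
      have hseg : (l.drop i).take (j + 1 - i)
          = l[i] :: ((l.drop (i + 1)).take (j - (i + 1)) ++ [l[j]]) := by
        rw [hdi, show j + 1 - i = (j - i) + 1 from by omega, List.take_succ_cons, hseg2]
      have htakei1 : l.take (i + 1) = l.take i ++ [l[i]] := by
        rw [List.take_succ]
        simp [List.getElem?_eq_getElem hi]
      rw [pvSwapLoop, dif_pos hij]
      simp only [hgi, hgj, List.contains_eq_mem, decide_eq_true_eq]
      by_cases hc : l[i] ∈ pvPunct
      · rw [if_pos hc, ih l (i + 1) j (by omega) hj (by omega)]
        rw [show j + 1 - (i + 1) = j - i from by omega, hseg2, htakei1, hseg,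
          pvG_cons_concat, if_pos hc]
        simp only [List.append_assoc, List.singleton_append, List.cons_append, List.nil_append]
      · rw [if_neg hc]
        by_cases hcj : l[j] ∈ pvPunct
        · rw [if_pos hcj, ih l i (j - 1) (by omega) (by omega) (by omega)]
          have hseg3 : (l.drop i).take (j - 1 + 1 - i)
              = l[i] :: (l.drop (i + 1)).take (j - (i + 1)) := by
            rw [hdi, show j - 1 + 1 - i = (j - (i + 1)) + 1 from by omega,
              List.take_succ_cons]
          rw [hseg3, show j - 1 + 1 = j from by omega, hdj, hseg, pvG_cons_concat,
            if_neg hc, if_pos hcj]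
          simp only [List.append_assoc, List.singleton_append, List.cons_append, List.nil_append]
        · rw [if_neg hcj]
          have hj' : j < ((l.set i l[j]).set j l[i]).length := by simpa using hj
          have hX : l.set i l[j]
              = (l.take i ++ l[j] :: (l.drop (i + 1)).take (j - (i + 1))) ++ l.drop j := by
            rw [List.set_eq_take_cons_drop _ hi]
            conv_lhs => rw [hdi1]
            simp
          have hfrontlen : (l.take i ++ l[j] :: (l.drop (i + 1)).take (j - (i + 1))).length
              = j := by
            simp
            omega
          have hl' : (l.set i l[j]).set j l[i]
              = (l.take i ++ l[j] :: (l.drop (i + 1)).take (j - (i + 1)))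
                ++ (l[i] :: l.drop (j + 1)) := by
            rw [List.set_eq_take_cons_drop _ (by simpa using hj)]
            congr 1
            · rw [hX, List.take_left' hfrontlen]
            · congr 1
              rw [hX, hdj,
                show (l.take i ++ l[j] :: (l.drop (i + 1)).take (j - (i + 1)))
                    ++ (l[j] :: l.drop (j + 1))
                  = ((l.take i ++ l[j] :: (l.drop (i + 1)).take (j - (i + 1))) ++ [l[j]])
                    ++ l.drop (j + 1) from by simp]
              rw [List.drop_left' (by simp only [List.length_append, hfrontlen, List.length_cons, List.length_nil])]
          rw [ih ((l.set i l[j]).set j l[i]) (i + 1) (j - 1) (by omega) (by omega)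
            (by omega)]
          have hl'2 : (l.set i l[j]).set j l[i]
              = (l.take i ++ [l[j]])
                ++ ((l.drop (i + 1)).take (j - (i + 1)) ++ (l[i] :: l.drop (j + 1))) := by
            rw [hl']; simp
          have h1 : ((l.set i l[j]).set j l[i]).take (i + 1) = l.take i ++ [l[j]] := by
            rw [hl'2, List.take_left' (by simp; omega)]
          have h2 : ((l.set i l[j]).set j l[i]).drop (i + 1)
              = (l.drop (i + 1)).take (j - (i + 1)) ++ (l[i] :: l.drop (j + 1)) := by
            rw [hl'2, List.drop_left' (by simp; omega)]
          have h3 : (((l.set i l[j]).set j l[i]).drop (i + 1)).take (j - 1 + 1 - (i + 1))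
              = (l.drop (i + 1)).take (j - (i + 1)) := by
            rw [h2, show j - 1 + 1 - (i + 1) = j - (i + 1) from by omega,
              List.take_left' hmidlen]
          have h4 : ((l.set i l[j]).set j l[i]).drop (j - 1 + 1)
              = l[i] :: l.drop (j + 1) := by
            rw [show j - 1 + 1 = j from by omega, hl', List.drop_left' hfrontlen]
          rw [h1, h3, h4, hseg, pvG_cons_concat, if_neg hc, if_neg hcj]
          simp only [List.append_assoc, List.singleton_append, List.cons_append, List.nil_append]
    · rw [pvSwapLoop, dif_neg hij]
      exact pvSwapLoop_base l i j hij hj hle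

theorem pv_list_level (l : List Char) :
    pvResultLoop l (pvStackLoop l) = pvSwapLoop l 0 (l.length - 1) := by
  by_cases hnil : l = []
  · subst hnil
    rw [pvSwapLoop]
    simp [pvResultLoop, pvStackLoop]
  · have hlen : 0 < l.length := List.length_pos_of_ne_nil hnil
    rw [pvStackLoop_eq, pvResultLoop_eq,
      pvSwapLoop_eq l.length l 0 (l.length - 1) (by omega) (by omega) (by omega)]
    rw [show l.length - 1 + 1 = l.length from by omega]
    simp only [Nat.sub_zero, List.take_zero, List.drop_zero, List.take_length,
      List.drop_length, List.nil_append, List.append_nil]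
    exact (pvG_eq l.length l le_rfl).symm

-- ===== VERDICT (by name: the statement is the Claim_ definition above) =====
theorem reverse_without_punctuation_using_stack_spec : Claim_equal_reverse_without_punctuation_using_stack := by
  intro s _
  unfold Spec_reverse_without_punctuation_using_stack
  unfold reverse_without_punctuation_using_stack reverse_without_punctuation_using_stack_alt
  exact congrArg String.mk (pv_list_level s.toList)
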